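-- pv_equiv track=rewrite | github.com/hermanvadym/bundle-platform | src/bundle_platform/eval/strategies/with_rerank.py | _parse_context_block
-- ===== SOURCE A (Python) =====
-- def _parse_context_block(text: str) -> list[dict]:
--     """Parse retriever output text into list of chunk dicts.
--
--     Handles both header formats emitted by retriever.py:
--       === filepath (lines X-Y) ===
--       === filepath (keyword matches) ===
--     """
--     chunks: list[dict] = []
--     current_path = ""
--     current_lines: list[str] = []
--
--     for line in text.splitlines():
--         if line.startswith("=== ") and " (lines " in line:
--             if current_lines:
--                 chunks.append({"file_path": current_path, "text": "\n".join(current_lines)})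
--                 current_lines = []
--             current_path = line.split(" (lines ")[0].removeprefix("=== ").strip()
--         else:
--             current_lines.append(line)
--
--     if current_lines:
--         chunks.append({"file_path": current_path, "text": "\n".join(current_lines)})
--     return chunks
-- ===== SOURCE B (Python) =====
-- def _span(pred, xs):
--     """Longest prefix of xs satisfying pred, and the remainder."""
--     for i, x in enumerate(xs):
--         if not pred(x):
--             return xs[:i], xs[i:]
--     return xs, []
--
--
-- def _is_separator(line: str) -> bool:
--     return line.startswith("=== ") and " (lines " in line
--
--
-- def _separator_path(line: str) -> str:
--     return line.split(" (lines ")[0].removeprefix("=== ").strip()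
--
--
-- def _parse_context_block(text: str) -> list[dict]:
--     chunks: list[dict] = []
--     path = ""
--     rest = text.splitlines()
--     while True:
--         block, after = _span(lambda l: not _is_separator(l), rest)
--         if block:
--             chunks.append({"file_path": path, "text": "\n".join(block)})
--         if not after:
--             return chunks
--         path = _separator_path(after[0])
--         rest = after[1:]
-- ===== Notes on version B (the rewrite author's own statement) =====
-- stated objective: alternative
-- what changed: Replaces the per-line accumulate-and-flush loop with a span-based decomposition: repeatedly split the remaining lines at the next separator line, emitting each non-empty run with the path carried over from the previous separator.
import Mathlib
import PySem

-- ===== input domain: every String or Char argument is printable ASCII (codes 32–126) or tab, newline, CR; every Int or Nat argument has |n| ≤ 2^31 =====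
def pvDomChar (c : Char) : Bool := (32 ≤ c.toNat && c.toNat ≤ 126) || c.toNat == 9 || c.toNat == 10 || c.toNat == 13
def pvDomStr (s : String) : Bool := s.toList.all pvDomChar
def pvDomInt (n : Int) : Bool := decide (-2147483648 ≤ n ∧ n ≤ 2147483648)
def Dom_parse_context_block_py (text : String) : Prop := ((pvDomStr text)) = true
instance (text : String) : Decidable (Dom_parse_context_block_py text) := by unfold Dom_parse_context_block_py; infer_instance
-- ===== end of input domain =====

-- B restructures A's accumulate-and-flush loop as a span-based scan over the remaining lines; return values are identical (objective: alternative).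

-- shared helpers: both Pythons test/extract the separator with the same expressions
-- s.removeprefix(p), ported by hand: s[len(p):] if s.startswith(p) else s (exact)
def pyRemoveprefix (s p : String) : String :=
  if PySem.Str.startswith s p then PySem.Str.slice s (some ((p.toList.length : Int))) none else s

def pvIsSep (line : String) : Bool :=
  PySem.Str.startswith line "=== " && PySem.Str.isIn " (lines " line

def pvPathOf (line : String) : String :=
  PySem.Str.strip (pyRemoveprefix (((PySem.Str.split? line " (lines ").getD []).headI) "=== ")

-- chunks.append({...}) guarded by 'if current_lines:' (both Pythons build this same dict literal)
def pvEmit (path : String) (cur : List String) (chunks : List (List (String × String))) :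
    List (List (String × String)) :=
  if cur.isEmpty then chunks
  else chunks ++ [[("file_path", path), ("text", PySem.Str.join "\n" cur)]]

-- ===== PORT A =====
-- loop body of A: state = (chunks, current_path, current_lines)
def pvStepA (st : List (List (String × String)) × String × List String) (line : String) :
    List (List (String × String)) × String × List String :=
  if pvIsSep line then (pvEmit st.2.1 st.2.2 st.1, pvPathOf line, ([] : List String))
  else (st.1, st.2.1, st.2.2 ++ [line])

def parse_context_block_py (text : String) : List (List (String × String)) :=
  let r := (PySem.Str.splitlines text).foldl pvStepA ([], "", [])
  pvEmit r.2.1 r.2.2 r.1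

-- ===== PORT B =====
-- _span(pred, xs): longest prefix satisfying pred, and the remainder
def pySpan (p : String → Bool) : List String → List String × List String
  | [] => ([], [])
  | x :: xs => if p x then ((pySpan p xs).1.cons x, (pySpan p xs).2) else ([], x :: xs)

theorem pySpan_snd_length_le (p : String → Bool) (xs : List String) :
    (pySpan p xs).2.length ≤ xs.length := by
  induction xs with
  | nil => simp [pySpan]
  | cons x xs ih => by_cases h : p x = true <;> simp [pySpan, h] <;> omega

-- the 'while True' loop of B over (chunks, path, rest)
def pvAltGo (chunks : List (List (String × String))) (path : String) (rest : List String) :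
    List (List (String × String)) :=
  let sp := pySpan (fun l => !pvIsSep l) rest
  match h2 : sp.2 with
  | [] => pvEmit path sp.1 chunks
  | s :: r' => pvAltGo (pvEmit path sp.1 chunks) (pvPathOf s) r'
termination_by rest.length
decreasing_by
  have := pySpan_snd_length_le (fun l => !pvIsSep l) rest
  simp only [sp] at h2
  rw [h2] at this
  simp at this ⊢
  omega

def parse_context_block_py_alt (text : String) : List (List (String × String)) :=
  pvAltGo [] "" (PySem.Str.splitlines text)

-- ===== PRECONDITION & SPEC =====
def Spec_parse_context_block_py (text : String) (out : List (List (String × String))) : Prop := out = parse_context_block_py_alt text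
instance (text : String) (out : List (List (String × String))) : Decidable (Spec_parse_context_block_py text out) := by unfold Spec_parse_context_block_py; infer_instance

-- ===== CLAIM (what is proved, stated in full; the proofs are below) =====
def Claim_equal_parse_context_block_py : Prop := ∀ (text : String), Dom_parse_context_block_py text → Spec_parse_context_block_py text (parse_context_block_py text)

-- ===== LEMMAS AND PROOFS =====

theorem pvAltGo_eq (chunks : List (List (String × String))) (path : String) (rest : List String) :
    pvAltGo chunks path rest =
      (match (pySpan (fun l => !pvIsSep l) rest).2 with
       | [] => pvEmit path (pySpan (fun l => !pvIsSep l) rest).1 chunks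
       | s :: r' => pvAltGo (pvEmit path (pySpan (fun l => !pvIsSep l) rest).1 chunks) (pvPathOf s) r') := by
  rw [pvAltGo]
  split <;> rename_i heq <;> rw [heq]

theorem pv_main (rest : List String) :
    ∀ (chunks : List (List (String × String))) (path : String) (cur : List String),
      (let r := rest.foldl pvStepA (chunks, path, cur); pvEmit r.2.1 r.2.2 r.1) =
      (match (pySpan (fun l => !pvIsSep l) rest).2 with
       | [] => pvEmit path (cur ++ (pySpan (fun l => !pvIsSep l) rest).1) chunks
       | s :: r' => pvAltGo (pvEmit path (cur ++ (pySpan (fun l => !pvIsSep l) rest).1) chunks) (pvPathOf s) r') := by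
  induction rest with
  | nil => intro chunks path cur; simp [pySpan]
  | cons l ls ih =>
    intro chunks path cur
    by_cases h : pvIsSep l = true
    · have hstep : pvStepA (chunks, path, cur) l =
          (pvEmit path cur chunks, pvPathOf l, ([] : List String)) := by
        simp [pvStepA, h]
      have hsp : pySpan (fun l => !pvIsSep l) (l :: ls) = ([], l :: ls) := by
        simp [pySpan, h]
      simp only [List.foldl_cons, hstep, hsp, List.append_nil]
      rw [pvAltGo_eq]
      have := ih (pvEmit path cur chunks) (pvPathOf l) []
      simpa using this
    · have hstep : pvStepA (chunks, path, cur) l = (chunks, path, cur ++ [l]) := by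
        simp [pvStepA, h]
      have hsp : pySpan (fun l => !pvIsSep l) (l :: ls) =
          (l :: (pySpan (fun l => !pvIsSep l) ls).1, (pySpan (fun l => !pvIsSep l) ls).2) := by
        simp [pySpan, h]
      simp only [List.foldl_cons, hstep, hsp]
      rw [List.append_cons cur l ((pySpan (fun l => !pvIsSep l) ls).1)]
      exact ih chunks path (cur ++ [l])

-- ===== VERDICT (by name: the statement is the Claim_ definition above) =====
theorem parse_context_block_py_spec : Claim_equal_parse_context_block_py := by
  intro text _
  unfold Spec_parse_context_block_py parse_context_block_py parse_context_block_py_alt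
  rw [pv_main (PySem.Str.splitlines text) [] "" []]
  rw [pvAltGo_eq]
  simp
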